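-- pv_equiv track=rewrite | github.com/AdLucem/Linguistics-2-Project | twitest_for_feature_2.py | wordlen
-- ===== SOURCE A (Python) =====
-- def wordlen(tag) :
--
--     length = 0
--
--     if(len(tag) == 0) :
--         length = 0
--     elif len(tag.split("_")) > 1 :
--         length = len(tag.split("_"))
--     else :
--         try :
--             wordlist = []
--             word = ""
--             for i in range(len(tag)) :
--                 word += tag[i]
--                 if(tag[i+1]) in "ABCDEFGHIJKLMNOPQRSTSUVWXYZ" and tag[i] in "abcdefghijklmnopqrstuvwxyz" :
--                     wordlist.append(word)
--                     word = ""
--         except IndexError :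
--             wordlist.append(word)
--         finally :
--             if len(wordlist) > 1 :
--                 length = len(wordlist)
--             else :
--                 if(len(tag)>30) :
--                     length = len(tag)
--     return length
-- ===== SOURCE B (Python) =====
-- LOWER = "abcdefghijklmnopqrstuvwxyz"
-- UPPER = "ABCDEFGHIJKLMNOPQRSTUVWXYZ"
--
-- def wordlen(tag):
--     if len(tag) == 0:
--         return 0
--     parts = tag.split("_")
--     if len(parts) > 1:
--         return len(parts)
--     boundaries = sum(1 for a, b in zip(tag, tag[1:])
--                      if a in LOWER and b in UPPER)
--     words = boundaries + 1
--     if words > 1: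
--         return words
--     return len(tag) if len(tag) > 30 else 0
-- ===== Notes on version B (the rewrite author's own statement) =====
-- stated objective: simpler
-- what changed: Replaces A's index loop with try/except IndexError termination and explicit word-string/word-list accumulation by guards plus a closed-form count of camelCase boundaries over adjacent character pairs (words = boundaries + 1).
import Mathlib
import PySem

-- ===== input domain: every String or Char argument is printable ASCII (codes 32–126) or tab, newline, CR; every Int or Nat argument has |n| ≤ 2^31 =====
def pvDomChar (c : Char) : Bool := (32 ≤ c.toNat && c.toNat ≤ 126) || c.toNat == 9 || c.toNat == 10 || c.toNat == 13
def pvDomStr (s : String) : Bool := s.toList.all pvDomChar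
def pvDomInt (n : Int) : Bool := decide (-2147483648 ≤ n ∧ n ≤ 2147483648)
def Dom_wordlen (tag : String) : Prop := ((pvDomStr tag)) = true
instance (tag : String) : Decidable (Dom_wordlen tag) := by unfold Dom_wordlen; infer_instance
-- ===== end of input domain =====

-- B replaces A's index loop with try/except termination and word-list accumulation by a
-- counted closed form over adjacent pairs (boundaries + 1); objective: simpler.

-- ===== PORT A =====
def pvLower : List Char := "abcdefghijklmnopqrstuvwxyz".toList
-- A's literal uppercase alphabet (with its duplicated 'S') kept verbatim
def pvUpperA : List Char := "ABCDEFGHIJKLMNOPQRSTSUVWXYZ".toList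

-- the for-loop of A's try-block; `cs[i+1]? = none` is the IndexError caught by `except`
def wordlenLoop (cs : List Char) (i : Nat) (wordlist : List (List Char)) (word : List Char) :
    List (List Char) :=
  if h : i < cs.length then
    let word' := word ++ [cs[i]]
    match cs[i+1]? with
    | none => wordlist ++ [word']
    | some c =>
        if pvUpperA.contains c && pvLower.contains cs[i] then
          wordlenLoop cs (i+1) (wordlist ++ [word']) []
        else
          wordlenLoop cs (i+1) wordlist word'
  else wordlist
  termination_by cs.length - i

def wordlen (tag : String) : Int :=
  let cs := tag.toList
  if cs.length = 0 then 0
  else if (PySem.Chars.splitOn cs ['_']).length > 1 then ((PySem.Chars.splitOn cs ['_']).length : Int)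
  else
    let wordlist := wordlenLoop cs 0 [] []
    if wordlist.length > 1 then (wordlist.length : Int)
    else if cs.length > 30 then (cs.length : Int) else 0

-- ===== PORT B =====
def pvUpperB : List Char := "ABCDEFGHIJKLMNOPQRSTUVWXYZ".toList

def wordlen_alt (tag : String) : Int :=
  let cs := tag.toList
  if cs.length = 0 then 0
  else
    let parts := PySem.Chars.splitOn cs ['_']
    if parts.length > 1 then (parts.length : Int)
    else
      let boundaries := (cs.zip cs.tail).countP (fun p => pvLower.contains p.1 && pvUpperB.contains p.2)
      let words := boundaries + 1
      if words > 1 then (words : Int)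
      else if cs.length > 30 then (cs.length : Int) else 0

-- ===== PRECONDITION & SPEC =====
def Spec_wordlen (tag : String) (out : Int) : Prop := out = wordlen_alt tag
instance (tag : String) (out : Int) : Decidable (Spec_wordlen tag out) := by unfold Spec_wordlen; infer_instance

-- ===== CLAIM (what is proved, stated in full; the proofs are below) =====
def Claim_equal_wordlen : Prop := ∀ (tag : String), Dom_wordlen tag → Spec_wordlen tag (wordlen tag)

-- ===== LEMMAS AND PROOFS =====

lemma upper_contains_eq (c : Char) : pvUpperA.contains c = pvUpperB.contains c := by
  by_cases h : c = 'S' <;> simp [pvUpperA, pvUpperB, h]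

-- the loop's resulting word count is wordlist.length + 1 + (camelCase boundaries from i on)
lemma wordlenLoop_length_aux (cs : List Char) :
    ∀ n i wordlist word, cs.length - i = n → i < cs.length →
    (wordlenLoop cs i wordlist word).length =
      wordlist.length + 1 +
        (((cs.drop i).zip (cs.drop (i+1))).countP
          (fun p => pvUpperA.contains p.2 && pvLower.contains p.1)) := by
  intro n
  induction n using Nat.strong_induction_on with
  | _ n ih =>
    intro i wordlist word hn hi
    rw [wordlenLoop]
    simp only [hi, dite_true]
    rcases h2 : cs[i+1]? with _ | c
    · have hle : cs.length ≤ i + 1 := by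
        by_contra hlt
        exact absurd h2 (by simp [List.getElem?_eq_getElem (by omega : i + 1 < cs.length)])
      have : cs.drop (i+1) = [] := List.drop_eq_nil_of_le hle
      simp [this]
    · have hi1 : i + 1 < cs.length := by
        by_contra hlt
        rw [List.getElem?_eq_none (by omega)] at h2
        exact absurd h2 (by simp)
      have hd : cs.drop i = cs[i] :: cs.drop (i+1) := List.drop_eq_getElem_cons hi
      have hd1 : cs.drop (i+1) = cs[i+1] :: cs.drop (i+2) := List.drop_eq_getElem_cons hi1
      have hc : c = cs[i+1] := by
        have := List.getElem?_eq_getElem hi1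
        rw [h2] at this; exact Option.some_inj.mp this
      rw [hd, hd1]
      simp only [List.zip_cons_cons, List.countP_cons]
      rw [← hd1]
      subst hc
      by_cases hb : (pvUpperA.contains cs[i+1] && pvLower.contains cs[i]) = true
      · rw [if_pos hb]
        rw [ih (cs.length - (i+1)) (by omega) (i+1) _ _ rfl hi1]
        have hp : cs[i+1] ∈ pvUpperA ∧ cs[i] ∈ pvLower := by simpa using hb
        simp [hp, show i+1+1 = i+2 from rfl]
        omega
      · rw [if_neg hb]
        rw [ih (cs.length - (i+1)) (by omega) (i+1) _ _ rfl hi1]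
        have hp : ¬(cs[i+1] ∈ pvUpperA ∧ cs[i] ∈ pvLower) := by simpa using hb
        simp [hp, show i+1+1 = i+2 from rfl]

-- the loop's resulting word count is wordlist.length + 1 + (camelCase boundaries from i on)
lemma wordlenLoop_length (cs : List Char) (i : Nat) (wordlist : List (List Char))
    (word : List Char) (hi : i < cs.length) :
    (wordlenLoop cs i wordlist word).length =
      wordlist.length + 1 +
        (((cs.drop i).zip (cs.drop (i+1))).countP
          (fun p => pvUpperA.contains p.2 && pvLower.contains p.1)) :=
  wordlenLoop_length_aux cs (cs.length - i) i wordlist word rfl hi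

-- ===== VERDICT (by name: the statement is the Claim_ definition above) =====
theorem wordlen_spec : Claim_equal_wordlen := by
  intro tag _
  unfold Spec_wordlen wordlen wordlen_alt
  set cs := tag.toList with hcs
  by_cases h0 : cs.length = 0
  · simp [h0]
  · simp only [h0, ite_false]
    by_cases hs : (PySem.Chars.splitOn cs ['_']).length > 1
    · simp [hs]
    · simp only [hs, ite_false]
      have hlen : (wordlenLoop cs 0 [] []).length =
          1 + ((cs.zip cs.tail).countP
            (fun p => pvLower.contains p.1 && pvUpperB.contains p.2)) := by
        rw [wordlenLoop_length cs 0 [] [] (by omega)]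
        have : ((cs.drop 0).zip (cs.drop 1)).countP
            (fun p => pvUpperA.contains p.2 && pvLower.contains p.1)
          = (cs.zip cs.tail).countP (fun p => pvLower.contains p.1 && pvUpperB.contains p.2) := by
          rw [List.drop_zero, ← List.tail_drop, List.drop_zero]
          apply List.countP_congr
          intro p _
          rw [upper_contains_eq, Bool.and_comm]
        rw [this]
        simp
      rw [hlen]
      set b := (cs.zip cs.tail).countP (fun p => pvLower.contains p.1 && pvUpperB.contains p.2)
      by_cases hb : 1 + b > 1
      · simp [Nat.add_comm 1 b]
      · simp [Nat.add_comm 1 b]
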